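-- pv_equiv track=rewrite | github.com/colinmorris/csc236 | docs/assignments/umax.py | umax2
-- ===== SOURCE A (Python) =====
-- def umax2(A):
--     """Our second attempt. This is the version you must prove the correctness
--     of in question 2(c).
--     """
--     if len(A) == 1:
--         return A[0]
--     head = A[0]
--     tail = A[1:]
--     tmax = umax2(tail)
--     if head == tmax:
--         return -1 * head
--     elif head > abs(tmax):
--         return head
--     else:
--         return tmax
-- ===== SOURCE B (Python) =====
-- def umax2(A):
--     acc = A[-1]
--     for h in reversed(A[:-1]):
--         if h == acc:
--             acc = -h
--         elif h > abs(acc):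
--             acc = h
--     return acc
-- ===== Notes on version B (the rewrite author's own statement) =====
-- stated objective: faster
-- what changed: Replaces the slicing recursion (each call copies the tail) by a single right-to-left iterative pass applying the same combine rule to an accumulator.
import Mathlib
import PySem

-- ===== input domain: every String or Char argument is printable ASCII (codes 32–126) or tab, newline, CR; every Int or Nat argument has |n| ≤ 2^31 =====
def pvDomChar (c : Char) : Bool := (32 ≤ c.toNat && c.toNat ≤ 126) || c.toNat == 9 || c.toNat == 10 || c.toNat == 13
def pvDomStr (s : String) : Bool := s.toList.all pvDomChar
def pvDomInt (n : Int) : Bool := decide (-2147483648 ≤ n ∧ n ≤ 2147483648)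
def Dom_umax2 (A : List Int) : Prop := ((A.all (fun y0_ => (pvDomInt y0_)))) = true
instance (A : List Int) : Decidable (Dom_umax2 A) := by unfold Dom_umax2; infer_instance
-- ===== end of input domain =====

-- B replaces A's slicing recursion by one iterative right-to-left pass (same combine rule); equivalence of return values on nonempty lists.

-- ===== PORT A =====
def umax2 (A : List Int) : Int :=
  match A with
  | [] => 0          -- unreachable under Pre_umax2: Python raises IndexError on []
  | [x] => x
  | head :: tail =>
    let tmax := umax2 tail
    if head = tmax then -1 * head
    else if head > |tmax| then head
    else tmax

-- ===== PORT B =====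
def umax2_alt (A : List Int) : Int :=
  (A.dropLast.reverse).foldl
    (fun acc h => if h = acc then -h else if h > |acc| then h else acc)
    ((PySem.List.pyGet? A (-1)).getD 0)

-- ===== PRECONDITION & SPEC =====
-- Pre_ excludes the empty list, on which both A and B raise IndexError.
def Pre_umax2 (A : List Int) : Prop := A ≠ []
instance (A : List Int) : Decidable (Pre_umax2 A) := by unfold Pre_umax2; infer_instance
def pvWitness_umax2 : List Int := [3, -3, 2]

def Spec_umax2 (A : List Int) (out : Int) : Prop := out = umax2_alt A
instance (A : List Int) (out : Int) : Decidable (Spec_umax2 A out) := by unfold Spec_umax2; infer_instance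

-- ===== CLAIM (what is proved, stated in full; the proofs are below) =====
def Claim_equal_umax2 : Prop := ∀ (A : List Int), Dom_umax2 A → Pre_umax2 A → Spec_umax2 A (umax2 A)

-- ===== LEMMAS AND PROOFS =====

theorem alt_singleton (x : Int) : umax2_alt [x] = x := by
  simp [umax2_alt, PySem.List.pyGet?, PySem.List.pyIdx?]

theorem alt_cons (h : Int) (t : List Int) (ht : t ≠ []) :
    umax2_alt (h :: t) =
      (if h = umax2_alt t then -h else if h > |umax2_alt t| then h else umax2_alt t) := by
  have hlast : (h :: t).getLast? = t.getLast? := by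
    cases t with
    | nil => exact absurd rfl ht
    | cons a b => simp [List.getLast?_cons]
  unfold umax2_alt
  rw [List.dropLast_cons_of_ne_nil ht, List.reverse_cons, List.foldl_append,
      PySem.List.pyGet?_neg_one, PySem.List.pyGet?_neg_one, hlast]
  simp [List.foldl]

theorem umax2_main (A : List Int) (hpre : A ≠ []) : umax2 A = umax2_alt A := by
  induction A with
  | nil => exact absurd rfl hpre
  | cons h t ih =>
    cases t with
    | nil => simp [umax2, alt_singleton]
    | cons h2 t2 =>
      have ht : (h2 :: t2 : List Int) ≠ [] := by simp
      rw [alt_cons h (h2 :: t2) ht, ← ih ht]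
      simp only [umax2]
      split_ifs with h1 h2' <;> simp_all

theorem umax2_spec : Claim_equal_umax2 := by
  intro A _ hpre
  exact umax2_main A hpre
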